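-- pv_equiv track=rewrite | github.com/lemurqr/expense-tracker | expense_tracker/db.py | _escape_psycopg_percent_literals
-- ===== SOURCE A (Python) =====
-- def _escape_psycopg_percent_literals(sql):
--     """Escape percent signs that are not valid psycopg placeholders."""
--     if "%" not in sql:
--         return sql
--
--     out = []
--     i = 0
--     while i < len(sql):
--         ch = sql[i]
--         if ch != "%":
--             out.append(ch)
--             i += 1
--             continue
--
--         if i + 1 < len(sql):
--             nxt = sql[i + 1]
--             if nxt in {"s", "b", "t", "%"}:
--                 out.append("%" + nxt)
--                 i += 2
--                 continue
--
--         out.append("%%")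
--         i += 1
--
--     return "".join(out)
-- ===== SOURCE B (Python) =====
-- def _escape_psycopg_percent_literals(sql):
--     """Escape percent signs that are not valid psycopg placeholders."""
--     pieces = sql.split("%")
--     out = [pieces[0]]
--     j = 1
--     while j < len(pieces):
--         p = pieces[j]
--         if p[:1] in ("s", "b", "t"):
--             out.append("%" + p)
--             j += 1
--         elif p == "" and j + 1 < len(pieces):
--             out.append("%%" + pieces[j + 1])
--             j += 2
--         else:
--             out.append("%%" + p)
--             j += 1
--     return "".join(out)
-- ===== Notes on version B (the rewrite author's own statement) =====
-- stated objective: alternative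
-- what changed: Replaces A's index-driven character-by-character state machine with str.split on the percent sign followed by a single pass over the pieces, re-attaching each separator as a placeholder pair or as a doubled (escaped) percent sign.
import Mathlib
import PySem

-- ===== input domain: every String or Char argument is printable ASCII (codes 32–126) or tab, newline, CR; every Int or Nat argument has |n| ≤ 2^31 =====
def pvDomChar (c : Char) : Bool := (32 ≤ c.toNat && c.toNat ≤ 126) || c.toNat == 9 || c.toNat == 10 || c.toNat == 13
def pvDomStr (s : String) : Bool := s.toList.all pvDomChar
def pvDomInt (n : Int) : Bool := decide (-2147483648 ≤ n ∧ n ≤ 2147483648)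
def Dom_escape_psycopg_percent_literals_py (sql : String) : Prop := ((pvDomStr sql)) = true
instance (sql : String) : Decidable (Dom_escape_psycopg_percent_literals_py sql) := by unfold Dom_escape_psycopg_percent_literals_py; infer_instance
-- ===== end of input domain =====

-- B replaces A's index-driven character state machine by split("%") followed by one pass
-- over the pieces (objective: alternative decomposition, same linear cost).

-- ===== PORT A =====
-- A's while-loop: one character, or one placeholder pair, per step
def goA : List Char → List Char
  | [] => []
  | c :: rest =>
    if c ≠ '%' then c :: goA rest
    else
      match _h : rest with
      | n :: rest' =>
        if n = 's' ∨ n = 'b' ∨ n = 't' ∨ n = '%' then '%' :: n :: goA rest'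
        else '%' :: '%' :: goA rest
      | [] => ['%', '%']
termination_by cs => cs.length
decreasing_by all_goals simp_all

def escape_psycopg_percent_literals_py (sql : String) : String :=
  if PySem.Str.isIn "%" sql = false then sql
  else String.ofList (goA sql.toList)

-- ===== PORT B =====
-- sql.split("%"): Python semantics for a one-character separator (empty pieces kept)
def splitP : List Char → List (List Char)
  | [] => [[]]
  | c :: cs =>
    if c = '%' then [] :: splitP cs
    else
      match splitP cs with
      | p :: ps => (c :: p) :: ps
      | [] => [[c]]

-- B's while-loop over pieces[1:]: one piece per step, or two when a pair of adjacent separators forms an escaped percent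
def goB : List (List Char) → List Char
  | [] => []
  | p :: ps =>
    if p.take 1 = ['s'] ∨ p.take 1 = ['b'] ∨ p.take 1 = ['t'] then '%' :: (p ++ goB ps)
    else if p = [] then
      match ps with
      | q :: ps' => '%' :: '%' :: (q ++ goB ps')
      | [] => '%' :: '%' :: (p ++ goB ([] : List (List Char)))
    else '%' :: '%' :: (p ++ goB ps)

def escape_psycopg_percent_literals_py_alt (sql : String) : String :=
  match splitP sql.toList with
  | p :: ps => String.ofList (p ++ goB ps)
  | [] => ""   -- unreachable: split never returns an empty list

-- ===== PRECONDITION & SPEC =====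
def Spec_escape_psycopg_percent_literals_py (sql : String) (out : String) : Prop := out = escape_psycopg_percent_literals_py_alt sql
instance (sql : String) (out : String) : Decidable (Spec_escape_psycopg_percent_literals_py sql out) := by unfold Spec_escape_psycopg_percent_literals_py; infer_instance

-- ===== CLAIM (what is proved, stated in full; the proofs are below) =====
def Claim_equal_escape_psycopg_percent_literals_py : Prop := ∀ (sql : String), Dom_escape_psycopg_percent_literals_py sql → Spec_escape_psycopg_percent_literals_py sql (escape_psycopg_percent_literals_py sql)

-- ===== LEMMAS AND PROOFS =====

-- the string the pieces q₁ :: q₂ :: … came from, with the separators restored: '%'q₁'%'q₂…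
def jtail : List (List Char) → List Char
  | [] => []
  | q :: ps => '%' :: (q ++ jtail ps)

-- one-step unfolding lemmas for the two loops
theorem goA_other (c : Char) (rest : List Char) (hc : c ≠ '%') :
    goA (c :: rest) = c :: goA rest := by
  rw [goA.eq_def]; simp [hc]

theorem goA_pair (n : Char) (rest : List Char) (hn : n = 's' ∨ n = 'b' ∨ n = 't' ∨ n = '%') :
    goA ('%' :: n :: rest) = '%' :: n :: goA rest := by
  rw [goA.eq_def]; simp [hn]

theorem goA_lone (n : Char) (rest : List Char) (hn : ¬ (n = 's' ∨ n = 'b' ∨ n = 't' ∨ n = '%')) :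
    goA ('%' :: n :: rest) = '%' :: '%' :: goA (n :: rest) := by
  rw [goA.eq_def]; simp [hn]

theorem goA_end : goA ['%'] = ['%', '%'] := by
  rw [goA.eq_def]; simp

theorem goA_append (p xs : List Char) (h : '%' ∉ p) : goA (p ++ xs) = p ++ goA xs := by
  induction p with
  | nil => rfl
  | cons c p ih =>
    have hc : c ≠ '%' := fun hcc => h (hcc ▸ List.mem_cons_self)
    have hp : '%' ∉ p := fun hm => h (List.mem_cons_of_mem _ hm)
    rw [List.cons_append, goA_other c _ hc, ih hp]; simp

theorem goB_nil : goB [] = [] := by rw [goB.eq_def]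

theorem goB_sbt (p : List Char) (ps : List (List Char))
    (h1 : p.take 1 = ['s'] ∨ p.take 1 = ['b'] ∨ p.take 1 = ['t']) :
    goB (p :: ps) = '%' :: (p ++ goB ps) := by
  rw [goB.eq_def]; simp only [if_pos h1]

theorem goB_pairstep (q : List Char) (ps' : List (List Char)) :
    goB ([] :: q :: ps') = '%' :: '%' :: (q ++ goB ps') := by
  rw [goB.eq_def]; simp

theorem goB_laststep : goB [[]] = ['%', '%'] := by
  rw [goB.eq_def]; simp [goB_nil]

theorem goB_lonestep (p : List Char) (ps : List (List Char))
    (h1 : ¬ (p.take 1 = ['s'] ∨ p.take 1 = ['b'] ∨ p.take 1 = ['t'])) (hp : p ≠ []) :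
    goB (p :: ps) = '%' :: '%' :: (p ++ goB ps) := by
  rw [goB.eq_def]; simp only [if_neg h1, if_neg hp]

theorem splitP_spec (cs : List Char) :
    ∃ p ps, splitP cs = p :: ps ∧ cs = p ++ jtail ps ∧ '%' ∉ p ∧ ∀ q ∈ ps, '%' ∉ q := by
  induction cs with
  | nil => exact ⟨[], [], rfl, rfl, by simp, by simp⟩
  | cons c cs ih =>
    obtain ⟨p, ps, hsp, hjoin, hp, hps⟩ := ih
    by_cases hc : c = '%'
    · refine ⟨[], p :: ps, by simp [splitP, hc, hsp], ?_, by simp, ?_⟩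
      · simp [jtail, hc, hjoin]
      · intro q hq
        rcases List.mem_cons.mp hq with h | h
        · exact h ▸ hp
        · exact hps q h
    · refine ⟨c :: p, ps, by simp [splitP, hc, hsp], by simp [hjoin], ?_, hps⟩
      intro hm
      rcases List.mem_cons.mp hm with h | h
      · exact hc h.symm
      · exact hp h

theorem goA_jtail (ps : List (List Char)) : (∀ q ∈ ps, '%' ∉ q) →
    goA (jtail ps) = goB ps := by
  induction ps using goB.induct with
  | case1 => intro _; simp [jtail, goB_nil, goA]
  | case2 p ps h1 ih =>
    intro h
    obtain ⟨n, p', rfl⟩ : ∃ n p', p = n :: p' := by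
      rcases p with _ | ⟨n, p'⟩
      · simp at h1
      · exact ⟨n, p', rfl⟩
    have hset : n = 's' ∨ n = 'b' ∨ n = 't' ∨ n = '%' := by
      rcases h1 with h1 | h1 | h1 <;> simp [List.take] at h1 <;> simp [h1]
    have hp' : '%' ∉ p' := fun hm => h _ List.mem_cons_self (List.mem_cons_of_mem _ hm)
    have hrec := ih (fun q hq => h q (List.mem_cons_of_mem _ hq))
    show goA ('%' :: (n :: p' ++ jtail ps)) = _
    rw [List.cons_append, goA_pair n _ hset, goA_append _ _ hp', hrec, goB_sbt _ _ h1]; simp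
  | case3 q ps' h1 ih =>
    intro h
    have hq : '%' ∉ q := h q (List.mem_cons_of_mem _ List.mem_cons_self)
    have hrec := ih (fun r hr => h r (List.mem_cons_of_mem _ (List.mem_cons_of_mem _ hr)))
    show goA ('%' :: ([] ++ '%' :: (q ++ jtail ps'))) = _
    rw [List.nil_append, goA_pair '%' _ (by simp), goA_append _ _ hq, hrec, goB_pairstep]
  | case4 h1 ih =>
    intro _
    show goA ('%' :: ([] ++ jtail [])) = _
    simp only [List.nil_append, jtail]
    rw [goA_end, goB_laststep]
  | case5 p ps h1 hp ih =>
    intro h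
    obtain ⟨n, p', rfl⟩ : ∃ n p', p = n :: p' := by
      rcases p with _ | ⟨n, p'⟩
      · exact absurd rfl hp
      · exact ⟨n, p', rfl⟩
    have hmem : '%' ∉ n :: p' := h _ List.mem_cons_self
    have hn : ¬ (n = 's' ∨ n = 'b' ∨ n = 't' ∨ n = '%') := by
      intro hc
      rcases hc with hc | hc | hc | hc
      · exact h1 (Or.inl (by simp [List.take, hc]))
      · exact h1 (Or.inr (Or.inl (by simp [List.take, hc])))
      · exact h1 (Or.inr (Or.inr (by simp [List.take, hc])))
      · exact hmem (hc ▸ List.mem_cons_self)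
    have hrec := ih (fun q hq => h q (List.mem_cons_of_mem _ hq))
    show goA ('%' :: (n :: p' ++ jtail ps)) = _
    rw [List.cons_append, goA_lone n _ hn, ← List.cons_append,
        goA_append _ _ hmem, hrec, goB_lonestep _ _ h1 hp]

theorem singleton_infix (a : Char) (l : List Char) (h : a ∈ l) : [a] <:+: l := by
  obtain ⟨s, t, rfl⟩ := List.append_of_mem h
  exact ⟨s, t, by simp⟩

theorem jtail_has_percent {ps : List (List Char)} (h : ps ≠ []) : '%' ∈ jtail ps := by
  rcases ps with _ | ⟨q, ps⟩
  · exact absurd rfl h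
  · simp [jtail]

-- ===== VERDICT (by name: the statement is the Claim_ definition above) =====
theorem escape_psycopg_percent_literals_py_spec : Claim_equal_escape_psycopg_percent_literals_py := by
  intro sql _
  unfold Spec_escape_psycopg_percent_literals_py
  unfold escape_psycopg_percent_literals_py escape_psycopg_percent_literals_py_alt
  obtain ⟨p, ps, hsp, hjoin, hp, hps⟩ := splitP_spec sql.toList
  by_cases hin : PySem.Str.isIn "%" sql = false
  · -- no '%' in sql: A returns it unchanged and split produced a single piece
    have hmem : '%' ∉ sql.toList := by
      intro hm
      have : PySem.Str.isIn "%" sql = true :=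
        (PySem.Str.isIn_iff_infix "%" sql).mpr (by simpa using singleton_infix '%' sql.toList hm)
      rw [hin] at this; exact Bool.noConfusion this
    have hpsnil : ps = [] := by
      by_contra hne
      exact hmem (hjoin ▸ List.mem_append_right p (jtail_has_percent hne))
    have hpl : p = sql.toList := by simpa [hpsnil, jtail] using hjoin.symm
    rw [if_pos hin, hsp, hpsnil]
    show sql = String.ofList (p ++ goB [])
    rw [goB_nil, List.append_nil, hpl, String.ofList_toList]
  · rw [if_neg hin, hsp]
    rw [hjoin, goA_append _ _ hp, goA_jtail ps hps]
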